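-- pv_equiv track=rewrite | github.com/DaphneZadoraUCLL/coursematerial_2425 | 07-tuples/11-assignment-heatwave/student.py | heatwave
-- ===== SOURCE A (Python) =====
-- def heatwave(temperatures):
--     hot = 0
--     really_hot = 0
--
--     for temp in temperatures:
--         if temp >= 25:
--             hot += 1
--             if temp >= 30:
--                 really_hot += 1
--
--         else:
--             hot = 0
--             really_hot = 0
--
--         if hot >= 5 and really_hot >= 3:
--             return True
--
--     return False
-- ===== SOURCE B (Python) =====
-- def heatwave(temperatures):
--     runs = []
--     current = []
--     for temp in temperatures:
--         if temp >= 25: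
--             current.append(temp)
--         else:
--             runs.append(current)
--             current = []
--     runs.append(current)
--     return any(len(run) >= 5 and sum(1 for t in run if t >= 30) >= 3
--                for run in runs)
-- ===== Notes on version B (the rewrite author's own statement) =====
-- stated objective: alternative
-- what changed: Replaces the two running counters with an early return by partitioning the input into maximal runs of temperatures >= 25 and testing each completed run's totals (length >= 5 and at least 3 elements >= 30), valid because both counters are monotone within a run.
import Mathlib
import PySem

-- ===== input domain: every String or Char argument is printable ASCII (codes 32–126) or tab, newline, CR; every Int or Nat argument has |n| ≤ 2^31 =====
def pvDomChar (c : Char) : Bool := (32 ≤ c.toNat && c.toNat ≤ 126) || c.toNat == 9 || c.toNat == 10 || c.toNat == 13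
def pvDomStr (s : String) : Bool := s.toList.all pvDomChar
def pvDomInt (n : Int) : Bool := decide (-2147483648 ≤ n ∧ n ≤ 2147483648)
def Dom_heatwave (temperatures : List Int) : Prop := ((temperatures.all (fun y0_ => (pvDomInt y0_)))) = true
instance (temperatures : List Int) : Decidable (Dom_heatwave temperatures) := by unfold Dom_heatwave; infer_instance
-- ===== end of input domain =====

-- B replaces A's running counters + early return by partitioning into maximal runs of
-- temperatures >= 25 and testing each run's totals; same results, same O(n) cost.


-- ===== PORT A =====
-- A's for-loop with its two counters and early `return True`, as structural recursion
def heatwaveLoop : List Int → Int → Int → Bool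
  | [], _, _ => false
  | temp :: ts, hot, really_hot =>
    if temp ≥ 25 then
      if hot + 1 ≥ 5 ∧ (if temp ≥ 30 then really_hot + 1 else really_hot) ≥ 3 then true
      else heatwaveLoop ts (hot + 1) (if temp ≥ 30 then really_hot + 1 else really_hot)
    else
      if (0 : Int) ≥ 5 ∧ (0 : Int) ≥ 3 then true else heatwaveLoop ts 0 0

def heatwave (temperatures : List Int) : Bool :=
  heatwaveLoop temperatures 0 0

-- ===== PORT B =====
-- B: collect maximal runs of temps >= 25 via a fold, then test each run's totals
def heatwave_alt (temperatures : List Int) : Bool :=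
  let p := temperatures.foldl
    (fun (st : List (List Int) × List Int) temp =>
      if temp ≥ 25 then (st.1, st.2 ++ [temp])
      else (st.1 ++ [st.2], ([] : List Int)))
    ([], [])
  (p.1 ++ [p.2]).any
    (fun run => decide (run.length ≥ 5) &&
                decide ((run.filter (fun t => decide (t ≥ (30 : Int)))).length ≥ 3))

-- ===== PRECONDITION & SPEC =====
def Spec_heatwave (temperatures : List Int) (out : Bool) : Prop := out = heatwave_alt temperatures
instance (temperatures : List Int) (out : Bool) : Decidable (Spec_heatwave temperatures out) := by unfold Spec_heatwave; infer_instance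

-- ===== CLAIM (what is proved, stated in full; the proofs are below) =====
def Claim_equal_heatwave : Prop := ∀ (temperatures : List Int), Dom_heatwave temperatures → Spec_heatwave temperatures (heatwave temperatures)

-- ===== LEMMAS AND PROOFS =====

-- number of "really hot" elements of a run
def cnt30 (run : List Int) : Nat := (run.filter (fun t => decide (t ≥ (30 : Int)))).length

-- per-run test of B
def okRun (run : List Int) : Bool := decide (run.length ≥ 5) && decide (cnt30 run ≥ 3)

theorem cnt30_append (cur : List Int) (t : Int) :
    cnt30 (cur ++ [t]) = cnt30 cur + (if t ≥ (30 : Int) then 1 else 0) := by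
  unfold cnt30
  by_cases h : t ≥ (30 : Int) <;> simp [List.filter_append, List.filter, h]

-- recursive description of the run splitting, `cur` = current unfinished run
def splitCont (cur : List Int) : List Int → List (List Int)
  | [] => [cur]
  | t :: ts => if t ≥ 25 then splitCont (cur ++ [t]) ts else cur :: splitCont [] ts

-- B's fold produces exactly the runs of splitCont
theorem foldl_splitCont (ts : List Int) (runs : List (List Int)) (cur : List Int) :
    (ts.foldl
        (fun (st : List (List Int) × List Int) temp =>
          if temp ≥ 25 then (st.1, st.2 ++ [temp])
          else (st.1 ++ [st.2], ([] : List Int)))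
        (runs, cur)).1 ++
      [(ts.foldl
        (fun (st : List (List Int) × List Int) temp =>
          if temp ≥ 25 then (st.1, st.2 ++ [temp])
          else (st.1 ++ [st.2], ([] : List Int)))
        (runs, cur)).2] = runs ++ splitCont cur ts := by
  induction ts generalizing runs cur with
  | nil => simp [splitCont]
  | cons t ts ih =>
    simp only [List.foldl_cons, splitCont]
    by_cases h : t ≥ 25
    · simpa [h] using ih runs (cur ++ [t])
    · simpa [h] using ih (runs ++ [cur]) []

-- A's loop condition after reading t (in a continuing run) is exactly B's test of cur++[t]
theorem cond_iff (cur : List Int) (t : Int) :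
    ((cur.length : Int) + 1 ≥ 5 ∧
      (if t ≥ (30 : Int) then ((cnt30 cur : Int)) + 1 else ((cnt30 cur : Int))) ≥ 3) ↔
    okRun (cur ++ [t]) = true := by
  unfold okRun
  simp only [Bool.and_eq_true, decide_eq_true_eq, List.length_append, cnt30_append]
  by_cases h30 : t ≥ (30 : Int)
  · simp only [if_pos h30, List.length_singleton]; omega
  · simp only [if_neg h30, List.length_singleton]; omega

-- within a run both totals are monotone: extending an ok run keeps it ok
theorem okRun_append (cur : List Int) (t : Int) (h : okRun cur = true) :
    okRun (cur ++ [t]) = true := by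
  unfold okRun at h ⊢
  simp only [Bool.and_eq_true, decide_eq_true_eq, List.length_append, cnt30_append] at h ⊢
  split <;> omega

theorem okRun_mono (ts : List Int) (cur : List Int) (h : okRun cur = true) :
    (splitCont cur ts).any okRun = true := by
  induction ts generalizing cur with
  | nil => simp [splitCont, h]
  | cons t ts ih =>
    simp only [splitCont]
    by_cases ht : t ≥ (25 : Int)
    · rw [if_pos ht]; exact ih (cur ++ [t]) (okRun_append cur t h)
    · simp [if_neg ht, List.any_cons, h]

-- main invariant: A's loop from the counters of the current run equals B's test of the
-- remaining runs, provided the current run does not already satisfy the test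
theorem loop_eq_runs (ts : List Int) (cur : List Int) (h : okRun cur = false) :
    heatwaveLoop ts ((cur.length : Int)) ((cnt30 cur : Int)) = (splitCont cur ts).any okRun := by
  induction ts generalizing cur with
  | nil =>
    simp [heatwaveLoop, splitCont, h]
  | cons t ts ih =>
    simp only [heatwaveLoop, splitCont]
    by_cases ht : t ≥ (25 : Int)
    · rw [if_pos ht, if_pos ht]
      have hlen : ((cur ++ [t]).length : Int) = (cur.length : Int) + 1 := by simp
      have hcnt : ((cnt30 (cur ++ [t]) : Int)) =
          if t ≥ (30 : Int) then ((cnt30 cur : Int)) + 1 else ((cnt30 cur : Int)) := by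
        rw [cnt30_append]
        by_cases h30 : t ≥ (30 : Int) <;> simp [h30]
      by_cases hok : okRun (cur ++ [t]) = true
      · rw [if_pos ((cond_iff cur t).mpr hok), okRun_mono ts _ hok]
      · have hok' : okRun (cur ++ [t]) = false := by simpa using hok
        rw [if_neg (fun hc => hok ((cond_iff cur t).mp hc))]
        have := ih (cur ++ [t]) hok'
        rw [hlen, hcnt] at this
        exact this
    · rw [if_neg ht, if_neg ht]
      have h0 : ¬ ((0 : Int) ≥ 5 ∧ (0 : Int) ≥ 3) := by omega
      rw [if_neg h0, List.any_cons, h]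
      simpa using ih [] (by rfl)

-- ===== VERDICT (by name: the statement is the Claim_ definition above) =====
theorem heatwave_spec : Claim_equal_heatwave := by
  intro ts _
  show heatwave ts = heatwave_alt ts
  unfold heatwave heatwave_alt
  show heatwaveLoop ts 0 0 =
    ((ts.foldl
        (fun (st : List (List Int) × List Int) temp =>
          if temp ≥ 25 then (st.1, st.2 ++ [temp])
          else (st.1 ++ [st.2], ([] : List Int)))
        ([], [])).1 ++
      [(ts.foldl
        (fun (st : List (List Int) × List Int) temp =>
          if temp ≥ 25 then (st.1, st.2 ++ [temp])
          else (st.1 ++ [st.2], ([] : List Int)))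
        ([], [])).2]).any okRun
  rw [foldl_splitCont ts [] []]
  simpa using loop_eq_runs ts [] (by rfl)
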